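-- pv_equiv track=rewrite | github.com/j-kumor/PodstawyProgramowania | Functions/7-19.py | f
-- ===== SOURCE A (Python) =====
-- def f(number):
--     digits = []
--     first_repeat = []
--     sum_of_repeated = 0
--     for i in str(number):
--         if i in digits:
--             sum_of_repeated += int(i)  # adding repeated digit to sum (doesn't add the first number found)
--             if i not in first_repeat:
--                 # work once when a repeated digit is found for the first time
--                 first_repeat += i
--                 sum_of_repeated += int(i)
--         else:
--             digits.append(str(i))
--
--     return sum_of_repeated
-- ===== SOURCE B (Python) =====
-- def f(number):
--     counts = {}
--     for ch in str(number):
--         counts[ch] = counts.get(ch, 0) + 1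
--     return sum(int(ch) * cnt for ch, cnt in counts.items() if cnt >= 2)
-- ===== Notes on version B (the rewrite author's own statement) =====
-- stated objective: idiomatic
-- what changed: Replaces the per-character seen/first-repeat sentinel lists (with their inner membership scans) by a frequency dict built in one pass, followed by a separate pass over the dict items summing digit*count for counts >= 2.
import Mathlib
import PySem

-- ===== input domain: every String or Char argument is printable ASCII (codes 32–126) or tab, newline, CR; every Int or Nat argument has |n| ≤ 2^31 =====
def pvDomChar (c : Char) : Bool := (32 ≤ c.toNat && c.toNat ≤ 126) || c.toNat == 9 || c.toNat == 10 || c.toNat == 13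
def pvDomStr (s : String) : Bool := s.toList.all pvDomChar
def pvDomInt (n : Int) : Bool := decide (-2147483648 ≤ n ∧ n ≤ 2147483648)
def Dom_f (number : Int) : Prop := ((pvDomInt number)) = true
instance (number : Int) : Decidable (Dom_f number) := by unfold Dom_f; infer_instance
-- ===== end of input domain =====

-- B replaces A's seen/first-repeat sentinel lists by a frequency dict plus one pass over its items (idiomatic; same result, no speed claim).

-- int(i) for a single character i; on the inputs admitted here str(number) repeats only digit
-- characters, so the .getD 0 default (Python's ValueError case) is never reached by either port.
def pyIntChar (c : Char) : Int := (PySem.Int.ofStr? (String.ofList [c])).getD 0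

-- ===== PORT A =====
-- one loop iteration of A: state = (digits, first_repeat, sum_of_repeated)
def fStep (st : List Char × List Char × Int) (i : Char) : List Char × List Char × Int :=
  let (digits, firstRepeat, s) := st
  if digits.contains i then
    let s := s + pyIntChar i
    if firstRepeat.contains i then (digits, firstRepeat, s)
    else (digits, firstRepeat ++ [i], s + pyIntChar i)
  else (digits ++ [i], firstRepeat, s)

def f (number : Int) : Int :=
  ((PySem.Int.toChars number).foldl fStep ([], [], 0)).2.2

-- ===== PORT B =====
def f_alt (number : Int) : Int :=
  let counts : PySem.Dict Char Int :=
    (PySem.Int.toChars number).foldl (fun d ch => d.insert ch (d.getD ch 0 + 1)) PySem.Dict.empty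
  (((counts.items.filter (fun p => 2 ≤ p.2)).map (fun p => pyIntChar p.1 * p.2)).sum)

-- ===== PRECONDITION & SPEC =====
def Spec_f (number : Int) (out : Int) : Prop := out = f_alt number
instance (number : Int) (out : Int) : Decidable (Spec_f number out) := by unfold Spec_f; infer_instance

-- ===== CLAIM (what is proved, stated in full; the proofs are below) =====
def Claim_equal_f : Prop := ∀ (number : Int), Dom_f number → Spec_f number (f number)

-- ===== LEMMAS AND PROOFS =====

-- the per-character contribution to the total, given the whole character list l
def fTerm (l : List Char) (c : Char) : Int :=
  if 2 ≤ l.count c then pyIntChar c * (l.count c : Int) else 0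

lemma count_append_singleton (l : List Char) (c x : Char) :
    List.count c (l ++ [x]) = List.count c l + if c = x then 1 else 0 := by
  by_cases hc : c = x
  · simp [List.count_append, hc]
  · simp [List.count_append, hc, Ne.symm hc]

lemma sum_map_update {x : Char} {s : List Char} (f g : Char → Int)
    (hnd : s.Nodup) (hx : x ∈ s) (hoff : ∀ c ∈ s, c ≠ x → f c = g c) :
    (s.map f).sum = (s.map g).sum + (f x - g x) := by
  induction s with
  | nil => cases hx
  | cons a t ih =>
    rcases List.mem_cons.mp hx with rfl | hxt
    · have : ∀ c ∈ t, f c = g c := fun c hc =>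
        hoff c (List.mem_cons_of_mem _ hc) (fun h => (List.nodup_cons.mp hnd).1 (h ▸ hc))
      simp [List.map_congr_left this]; ring
    · have ha : f a = g a := hoff a List.mem_cons_self
        (fun h => (List.nodup_cons.mp hnd).1 (h ▸ hxt))
      have := ih (List.nodup_cons.mp hnd).2 hxt
        (fun c hc hne => hoff c (List.mem_cons_of_mem _ hc) hne)
      simp [this, ha]; ring

-- B's filtered item sum over any key list is the sum of fTerm over that key list
lemma sum_filter_map (s : List Char) (l : List Char) :
    (((s.map (fun k => (k, (l.count k : Int)))).filter (fun p => 2 ≤ p.2)).map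
        (fun p => pyIntChar p.1 * p.2)).sum
      = (s.map (fTerm l)).sum := by
  induction s with
  | nil => rfl
  | cons a t ih =>
    by_cases h : 2 ≤ l.count a
    · have h' : (2:Int) ≤ (l.count a : Int) := by exact_mod_cast h
      simp [fTerm, h, h', ih]
    · have h' : ¬ (2:Int) ≤ (l.count a : Int) := by exact_mod_cast h
      simp [fTerm, h, h', ih]

-- the invariant of A's loop over a processed prefix l: digits holds the characters seen,
-- first_repeat the characters seen at least twice, and the sum is the fTerm-sum over the distinct characters
lemma foldA_invariant (l : List Char) :
    (∀ c, c ∈ (l.foldl fStep ([], [], 0)).1 ↔ c ∈ l) ∧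
    (∀ c, c ∈ (l.foldl fStep ([], [], 0)).2.1 ↔ 2 ≤ l.count c) ∧
    (l.foldl fStep ([], [], 0)).2.2 = ((PySem.Set.ofList l).map (fTerm l)).sum := by
  induction l using List.reverseRecOn with
  | nil => refine ⟨by simp, by simp, rfl⟩
  | append_singleton l x ih =>
    obtain ⟨h1, h2, h3⟩ := ih
    rw [List.foldl_append]
    set st := l.foldl fStep ([], [], 0) with hst
    obtain ⟨digits, fr, s⟩ := st
    simp only at h1 h2 h3
    have hterm_ne : ∀ c, c ≠ x → fTerm (l ++ [x]) c = fTerm l c := by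
      intro c hc
      unfold fTerm
      rw [count_append_singleton, if_neg hc]
      simp
    by_cases hmem : x ∈ l
    · -- x seen before: the `if i in digits` branch of A
      have hset : PySem.Set.ofList (l ++ [x]) = PySem.Set.ofList l := by
        rw [PySem.Set.ofList_eq_foldl, List.foldl_append, ← PySem.Set.ofList_eq_foldl]
        simp [PySem.Set.add, PySem.Set.contains, PySem.Set.mem_ofList, hmem]
      have hxset : x ∈ PySem.Set.ofList l := (PySem.Set.mem_ofList l x).mpr hmem
      have hnd : (PySem.Set.ofList l).Nodup := PySem.Set.nodup_ofList l
      have hcx : 1 ≤ l.count x := List.one_le_count_iff.mpr hmem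
      have hsum := sum_map_update (fTerm (l ++ [x])) (fTerm l) hnd hxset
        (fun c _ hne => hterm_ne c hne)
      have hdig : digits.contains x = true := List.contains_iff_mem.mpr ((h1 x).mpr hmem)
      have hcxx : (l ++ [x]).count x = l.count x + 1 := by
        rw [count_append_singleton]; simp
      have htermx : fTerm (l ++ [x]) x - fTerm l x
          = pyIntChar x + (if 2 ≤ l.count x then 0 else pyIntChar x) := by
        unfold fTerm
        rw [hcxx]
        by_cases h2x : 2 ≤ l.count x
        · rw [if_pos (show 2 ≤ l.count x + 1 by omega), if_pos h2x, if_pos h2x]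
          push_cast; ring
        · have hx1 : l.count x = 1 := by omega
          rw [hx1]
          norm_num
          ring
      by_cases h2x : 2 ≤ l.count x
      · -- repeated before: first_repeat already holds x
        have hfr : fr.contains x = true := List.contains_iff_mem.mpr ((h2 x).mpr h2x)
        simp only [List.foldl_cons, List.foldl_nil, fStep]
        rw [if_pos hdig, if_pos hfr]
        refine ⟨?_, ?_, ?_⟩
        · intro c
          rw [h1 c]
          constructor
          · exact fun h => List.mem_append.mpr (Or.inl h)
          · intro h
            rcases List.mem_append.mp h with h | h
            · exact h
            · exact (List.mem_singleton.mp h) ▸ hmem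
        · intro c
          rw [h2 c, count_append_singleton]
          by_cases hc : c = x
          · subst hc; rw [if_pos rfl]; omega
          · rw [if_neg hc]; omega
        · rw [hset, hsum, h3, htermx, if_pos h2x]; ring
      · -- first repeat of x happens now
        have hfr : ¬ fr.contains x = true := fun h =>
          h2x ((h2 x).mp (List.contains_iff_mem.mp h))
        simp only [List.foldl_cons, List.foldl_nil, fStep]
        rw [if_pos hdig, if_neg hfr]
        refine ⟨?_, ?_, ?_⟩
        · intro c
          rw [h1 c]
          constructor
          · exact fun h => List.mem_append.mpr (Or.inl h)
          · intro h
            rcases List.mem_append.mp h with h | h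
            · exact h
            · exact (List.mem_singleton.mp h) ▸ hmem
        · intro c
          rw [List.mem_append, List.mem_singleton, h2 c, count_append_singleton]
          by_cases hc : c = x
          · subst hc; rw [if_pos rfl]
            constructor
            · intro _; omega
            · intro _; right; rfl
          · rw [if_neg hc]
            constructor
            · rintro (h | h)
              · omega
              · exact absurd h hc
            · intro h; left; omega
        · rw [hset, hsum, h3, htermx, if_neg h2x]; ring
    · -- x new: the else branch of A
      have hdig : ¬ digits.contains x = true := fun h =>
        hmem ((h1 x).mp (List.contains_iff_mem.mp h))
      have hset : PySem.Set.ofList (l ++ [x]) = PySem.Set.ofList l ++ [x] := by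
        rw [PySem.Set.ofList_eq_foldl, List.foldl_append, ← PySem.Set.ofList_eq_foldl]
        simp [PySem.Set.add, PySem.Set.contains, PySem.Set.mem_ofList, hmem]
      have hcx : l.count x = 0 := List.count_eq_zero.mpr hmem
      have htx : fTerm (l ++ [x]) x = 0 := by
        unfold fTerm
        rw [count_append_singleton, if_pos rfl, hcx]
        norm_num
      simp only [List.foldl_cons, List.foldl_nil, fStep]
      rw [if_neg hdig]
      refine ⟨?_, ?_, ?_⟩
      · intro c
        simp [List.mem_append, h1 c]
      · intro c
        rw [h2 c, count_append_singleton]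
        by_cases hc : c = x
        · subst hc; rw [if_pos rfl, hcx]; omega
        · rw [if_neg hc]; omega
      · rw [hset, List.map_append, List.sum_append, h3]
        have hcongr : ((PySem.Set.ofList l).map (fTerm (l ++ [x]))).sum
            = ((PySem.Set.ofList l).map (fTerm l)).sum := by
          congr 1
          apply List.map_congr_left
          intro c hc
          exact hterm_ne c (fun h => hmem (h ▸ (PySem.Set.mem_ofList l c).mp hc))
        simp [hcongr, htx]

-- ===== VERDICT (by name: the statement is the Claim_ definition above) =====
theorem f_spec : Claim_equal_f := by
  intro number _
  show f number = f_alt number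
  unfold f f_alt
  simp only [PySem.Dict.foldl_insert_getD_add_one_eq_counter, PySem.Dict.items_counter,
    sum_filter_map]
  exact (foldA_invariant (PySem.Int.toChars number)).2.2
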